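-- pv_equiv track=rewrite | github.com/HikariIT/logic-parser | main.py | generate_combination_set
-- ===== SOURCE A (Python) =====
-- import itertools as it
--
-- def generate_combination_set(variable_names):
--     combinations = it.product(*[[True, False] for _ in range(len(variable_names))])
--     combination_set = []
--
--     for combination in combinations:
--         comb_dict = {}
--         for i, name in enumerate(variable_names):
--             comb_dict[name] = combination[i]
--         combination_set.append(comb_dict)
--
--     return combination_set
-- ===== SOURCE B (Python) =====
-- def generate_combination_set(variable_names):
--     result = [{}]
--     for name in variable_names:
--         result = [{**d, name: value} for d in result for value in (True, False)]
--     return result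
-- ===== Notes on version B (the rewrite author's own statement) =====
-- stated objective: idiomatic
-- what changed: Instead of enumerating all 2^n complete combinations with itertools.product and then building each dict in an inner indexing loop, B constructs the assignments incrementally: it folds over the variable names, doubling a list of partial dicts by extending each with name=True and name=False, so no product tuple or index lookup ever exists.
import Mathlib
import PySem

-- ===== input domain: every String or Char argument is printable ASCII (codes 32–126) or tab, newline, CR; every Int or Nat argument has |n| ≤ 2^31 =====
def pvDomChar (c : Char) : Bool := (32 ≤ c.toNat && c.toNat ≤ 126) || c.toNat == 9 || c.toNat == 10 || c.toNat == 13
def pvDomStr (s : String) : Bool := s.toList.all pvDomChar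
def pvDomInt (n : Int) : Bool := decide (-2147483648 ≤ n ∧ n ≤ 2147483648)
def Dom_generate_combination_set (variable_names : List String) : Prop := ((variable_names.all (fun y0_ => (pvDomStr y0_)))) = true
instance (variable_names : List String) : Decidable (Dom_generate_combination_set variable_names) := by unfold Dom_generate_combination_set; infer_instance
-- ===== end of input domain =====

-- B builds the assignments incrementally (a fold over the names doubling a list of partial dicts)
-- instead of enumerating all 2^n complete product tuples and indexing into them.


-- ===== PORT A =====
-- it.product(*[[True, False] for _ in range(n)]): tuples in product order (first pool varies slowest)
def prodTF : Nat → List (List Bool)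
  | 0 => [[]]
  | n + 1 => [true, false].flatMap (fun b => (prodTF n).map (fun t => b :: t))

-- inner loop: for i, name in enumerate(variable_names): comb_dict[name] = combination[i]
-- combination[i] is always in range (len(combination) = len(variable_names)), so pyGetD with any default is exact
def buildCombDict (variable_names : List String) (comb : List Bool) : List (String × Bool) :=
  ((PySem.List.enumerate variable_names 0).foldl
    (fun d p => d.insert p.2 (PySem.List.pyGetD comb p.1 false)) PySem.Dict.empty).items

def generate_combination_set (variable_names : List String) : List (List (String × Bool)) :=
  (prodTF variable_names.length).map (buildCombDict variable_names)

-- ===== PORT B =====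
-- result = [{}]; for name in variable_names: result = [{**d, name: value} for d in result for value in (True, False)]
-- ({**d, name: value} extends the dict d — a PySem.Dict here — with one insert)
def generate_combination_set_alt (variable_names : List String) : List (List (String × Bool)) :=
  (variable_names.foldl
    (fun acc name => acc.flatMap (fun d => [true, false].map (fun v => d.insert name v)))
    [(PySem.Dict.empty : PySem.Dict String Bool)]).map PySem.Dict.items

-- ===== PRECONDITION & SPEC =====
def Spec_generate_combination_set (variable_names : List String) (out : List (List (String × Bool))) : Prop := out = generate_combination_set_alt variable_names
instance (variable_names : List String) (out : List (List (String × Bool))) : Decidable (Spec_generate_combination_set variable_names out) := by unfold Spec_generate_combination_set; infer_instance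

-- ===== CLAIM (what is proved, stated in full; the proofs are below) =====
def Claim_equal_generate_combination_set : Prop := ∀ (variable_names : List String), Dom_generate_combination_set variable_names → Spec_generate_combination_set variable_names (generate_combination_set variable_names)

-- ===== LEMMAS AND PROOFS =====

-- insert-fold of an explicit pair list, the common form both sides reduce to
def dictOf (d : PySem.Dict String Bool) (L : List (String × Bool)) : PySem.Dict String Bool :=
  L.foldl (fun d p => d.insert p.1 p.2) d

-- B's loop body, named for the proofs
def stepB (acc : List (PySem.Dict String Bool)) (name : String) : List (PySem.Dict String Bool) :=
  acc.flatMap (fun d => [true, false].map (fun v => d.insert name v))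

theorem prodTF_length {n : Nat} {c : List Bool} (h : c ∈ prodTF n) : c.length = n := by
  induction n generalizing c with
  | zero => simp [prodTF] at h; simp [h]
  | succ n ih =>
    simp only [prodTF, List.mem_flatMap, List.mem_map] at h
    obtain ⟨b, _, t, ht, rfl⟩ := h
    simp [ih ht]

-- A's inner enumerate/pyGetD loop is the zip fold, for in-range indices
theorem enumFold (vars : List String) (comb : List Bool) (s : Nat)
    (d : PySem.Dict String Bool) (h : s + vars.length ≤ comb.length) :
    (PySem.List.enumerate vars (s : Int)).foldl
      (fun d p => d.insert p.2 (PySem.List.pyGetD comb p.1 false)) d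
    = dictOf d (vars.zip (comb.drop s)) := by
  induction vars generalizing s d with
  | nil => simp [PySem.List.enumerate_nil, dictOf]
  | cons x xs ih =>
    have hs : s < comb.length := by simp at h; omega
    rw [PySem.List.enumerate_cons, List.drop_eq_getElem_cons hs]
    simp only [List.foldl_cons, List.zip_cons_cons, dictOf, List.foldl_cons]
    have hget : PySem.List.pyGetD comb (s : Int) false = comb[s] := by
      rw [PySem.List.pyGetD_natCast, List.getD_eq_getElem _ _ hs]
    rw [hget]
    have := ih (s + 1) (d.insert x comb[s]) (by simp at h ⊢; omega)
    simp only [dictOf] at this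
    push_cast at this
    exact this

theorem buildCombDict_zip (vars : List String) (comb : List Bool)
    (h : comb.length = vars.length) :
    buildCombDict vars comb = (dictOf PySem.Dict.empty (vars.zip comb)).items := by
  unfold buildCombDict
  rw [show (0 : Int) = ((0 : Nat) : Int) from rfl, enumFold vars comb 0 _ (by omega)]
  simp

-- B's fold distributes over the accumulator list
theorem loopB_flatMap (vars : List String) (acc : List (PySem.Dict String Bool)) :
    vars.foldl stepB acc = acc.flatMap (fun d => vars.foldl stepB [d]) := by
  induction vars generalizing acc with
  | nil => simp
  | cons n vs ih =>
    simp only [List.foldl_cons]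
    rw [ih (stepB acc n),
      show stepB acc n = acc.flatMap (fun d => stepB [d] n) from by simp [stepB],
      List.flatMap_assoc]
    refine List.flatMap_congr ?_
    intro d _
    exact (ih (stepB [d] n)).symm

-- B's fold from a single seed is A's product mapped through the zip fold
theorem loopB_single (vars : List String) (d : PySem.Dict String Bool) :
    vars.foldl stepB [d] = (prodTF vars.length).map (fun c => dictOf d (vars.zip c)) := by
  induction vars generalizing d with
  | nil => simp [prodTF, dictOf]
  | cons n vs ih =>
    simp only [List.foldl_cons, List.length_cons, prodTF]
    rw [show stepB [d] n = [d.insert n true, d.insert n false] from by simp [stepB],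
      loopB_flatMap vs [d.insert n true, d.insert n false]]
    simp only [List.flatMap_cons, List.flatMap_nil, List.append_nil]
    rw [ih (d.insert n true), ih (d.insert n false)]
    simp only [List.map_append, List.map_map]
    congr 1

-- ===== VERDICT (by name: the statement is the Claim_ definition above) =====
theorem generate_combination_set_spec : Claim_equal_generate_combination_set := by
  intro vars _
  unfold Spec_generate_combination_set generate_combination_set generate_combination_set_alt
  have hB : vars.foldl
      (fun acc name => acc.flatMap (fun d => [true, false].map (fun v => d.insert name v)))
      [(PySem.Dict.empty : PySem.Dict String Bool)] = vars.foldl stepB [PySem.Dict.empty] := rfl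
  rw [hB, loopB_single, List.map_map]
  refine List.map_congr_left ?_
  intro c hc
  exact buildCombDict_zip vars c (prodTF_length hc)
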